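-- pv_equiv track=rewrite | github.com/lim123456789/programmers | 프로그래머스/2/138476. 귤 고르기/귤 고르기.py | solution
-- ===== SOURCE A (Python) =====
-- from collections import Counter
--
-- def solution(k, tangerine):
--     tcount = Counter(tangerine)
--
--     tsort = sorted(tcount.values(), reverse=True)
--
--     count = 0
--     total = 0
--
--     for i in tsort:
--         total += i
--         count += 1
--         if total >= k:
--             break
--
--     return count
-- ===== SOURCE B (Python) =====
-- from collections import Counter
--
-- def solution(k, tangerine):
--     tcount = Counter(tangerine)
--     if not tcount:
--         return 0
--     freq = Counter(tcount.values())   # bucket table: freq[c] = how many sizes occur c times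
--     mx = max(freq)
--     groups = 0
--     total = 0
--     for c in range(mx, 0, -1):        # counting-sort scan, largest multiplicity first
--         for _ in range(freq[c]):
--             total += c
--             groups += 1
--             if total >= k:
--                 return groups
--     return groups
-- ===== Notes on version B (the rewrite author's own statement) =====
-- stated objective: alternative
-- what changed: B replaces sorting the multiplicities in descending order with a counting-sort: it buckets the multiplicities in a second Counter and sweeps the bucket indices from the largest count down to 1, adding one size's count at a time until the running total reaches k.
import Mathlib
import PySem

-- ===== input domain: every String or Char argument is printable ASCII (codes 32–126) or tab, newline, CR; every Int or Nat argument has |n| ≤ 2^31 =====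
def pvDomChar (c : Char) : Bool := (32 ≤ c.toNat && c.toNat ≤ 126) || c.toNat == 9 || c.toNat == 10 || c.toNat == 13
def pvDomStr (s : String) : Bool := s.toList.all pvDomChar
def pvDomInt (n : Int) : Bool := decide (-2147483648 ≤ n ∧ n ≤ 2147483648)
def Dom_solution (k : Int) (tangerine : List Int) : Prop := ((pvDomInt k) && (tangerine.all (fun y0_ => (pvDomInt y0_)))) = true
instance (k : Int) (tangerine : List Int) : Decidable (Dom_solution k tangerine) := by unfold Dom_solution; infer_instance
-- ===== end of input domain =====

-- B replaces the comparison sort of the multiplicities by a counting-sort bucket scan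
-- (a second Counter over the counts, swept from the largest count down): objective "alternative".

-- ===== PORT A =====
-- the for-loop with break: total += i; count += 1; if total >= k: break
def pvGreedyA (k : Int) : List Int → Int → Int → Int
  | [], count, _total => count
  | i :: rest, count, total =>
      if total + i ≥ k then count + 1
      else pvGreedyA k rest (count + 1) (total + i)

def solution (k : Int) (tangerine : List Int) : Int :=
  let tcount := PySem.Dict.counter tangerine
  let tsort := PySem.List.sorted tcount.values (fun x => x) true
  pvGreedyA k tsort 0 0

-- ===== PORT B =====
-- inner 'for _ in range(freq[c])' : early return = Sum.inl
def pvInnerB (k c : Int) : Nat → Int → Int → Int ⊕ (Int × Int)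
  | 0, groups, total => Sum.inr (groups, total)
  | n+1, groups, total =>
      if total + c ≥ k then Sum.inl (groups + 1)
      else pvInnerB k c n (groups + 1) (total + c)

-- outer 'for c in range(mx, 0, -1)'
def pvOuterB (k : Int) (freq : PySem.Dict Int Int) : List Int → Int → Int → Int
  | [], groups, _total => groups
  | c :: rest, groups, total =>
      match pvInnerB k c (freq.getD c 0).toNat groups total with
      | Sum.inl r => r
      | Sum.inr (g, t) => pvOuterB k freq rest g t

def solution_alt (k : Int) (tangerine : List Int) : Int :=
  let tcount := PySem.Dict.counter tangerine
  if tcount.size = 0 then 0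
  else
    let freq := PySem.Dict.counter tcount.values
    let mx := (PySem.List.max? freq.keys (fun x => x)).getD 0
    pvOuterB k freq (PySem.List.pyRange mx 0 (-1)) 0 0

-- ===== PRECONDITION & SPEC =====
def Spec_solution (k : Int) (tangerine : List Int) (out : Int) : Prop := out = solution_alt k tangerine
instance (k : Int) (tangerine : List Int) (out : Int) : Decidable (Spec_solution k tangerine out) := by unfold Spec_solution; infer_instance

-- ===== CLAIM (what is proved, stated in full; the proofs are below) =====
def Claim_equal_solution : Prop := ∀ (k : Int) (tangerine : List Int), Dom_solution k tangerine → Spec_solution k tangerine (solution k tangerine)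

-- ===== LEMMAS AND PROOFS =====

-- the flattened counting-sort sequence for buckets m, m-1, …, 1
def pvFlat (vs : List Int) (m : Nat) : List Int :=
  (PySem.List.pyRange (m : Int) 0 (-1)).flatMap (fun c => List.replicate (vs.count c) c)

theorem pvFlat_zero (vs : List Int) : pvFlat vs 0 = [] := by
  simp [pvFlat, PySem.List.pyRange_neg_one_eq_nil (le_refl (0:Int))]

theorem pvFlat_succ (vs : List Int) (m : Nat) :
    pvFlat vs (m+1) = List.replicate (vs.count ((m:Int)+1)) ((m:Int)+1) ++ pvFlat vs m := by
  unfold pvFlat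
  rw [show ((m+1 : Nat) : Int) = (m:Int)+1 by push_cast; ring,
      PySem.List.pyRange_neg_one_cons (by positivity)]
  simp

theorem pvFlat_count (vs : List Int) (m : Nat) (a : Int) :
    (pvFlat vs m).count a = if 1 ≤ a ∧ a ≤ (m:Int) then vs.count a else 0 := by
  induction m with
  | zero => rw [pvFlat_zero]; simp; omega
  | succ m ih =>
      rw [pvFlat_succ, List.count_append, ih, List.count_replicate]
      by_cases ha : a = (m:Int)+1
      · subst ha; simp
      · push_cast
        split_ifs with h1 h2 h3 h2 h3 <;> simp_all <;> omega

theorem pvFlat_mem (vs : List Int) (m : Nat) :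
    ∀ x ∈ pvFlat vs m, 1 ≤ x ∧ x ≤ (m:Int) := by
  induction m with
  | zero => simp [pvFlat_zero]
  | succ m ih =>
      rw [pvFlat_succ]
      intro x hx
      rcases List.mem_append.1 hx with h | h
      · have := List.eq_of_mem_replicate h; subst this; push_cast; omega
      · have := ih x h; push_cast; omega

theorem pvFlat_pairwise (vs : List Int) (m : Nat) :
    (pvFlat vs m).Pairwise (fun a b => b ≤ a) := by
  induction m with
  | zero => simp [pvFlat_zero]
  | succ m ih =>
      rw [pvFlat_succ]
      refine List.pairwise_append.2 ⟨List.pairwise_replicate.2 (by simp), ih, ?_⟩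
      intro a ha b hb
      have := List.eq_of_mem_replicate ha
      have := (pvFlat_mem vs m b hb).2
      omega

theorem pvFlat_perm (vs : List Int) (m : Nat)
    (h : ∀ v ∈ vs, 1 ≤ v ∧ v ≤ (m:Int)) : (pvFlat vs m).Perm vs := by
  refine List.perm_iff_count.2 fun a => ?_
  rw [pvFlat_count]
  split_ifs with ha
  · rfl
  · symm
    simp only [List.count_eq_zero]
    intro hmem
    exact ha (h a hmem)

-- the counting-sort sequence IS sorted(vs, reverse=True)
theorem pvFlat_eq_sorted (vs : List Int) (m : Nat)
    (h : ∀ v ∈ vs, 1 ≤ v ∧ v ≤ (m:Int)) :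
    PySem.List.sorted vs (fun x => x) true = pvFlat vs m := by
  apply PySem.List.eq_of_perm_of_pairwise_le_of_injective (key := fun x : Int => -x)
  · exact fun a b hab => by simpa using hab
  · exact (PySem.List.sorted_perm vs (fun x => x) true).trans (pvFlat_perm vs m h).symm
  · exact (PySem.List.sorted_pairwise_rev vs (fun x => x)).imp (by intro a b hab; simpa using hab)
  · exact (pvFlat_pairwise vs m).imp (by intro a b hab; simpa using hab)

-- inner loop = greedy run over one bucket's replicate block
theorem pvInnerB_spec (k c : Int) (rest : List Int) :
    ∀ (n : Nat) (groups total : Int),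
      pvGreedyA k (List.replicate n c ++ rest) groups total =
        (match pvInnerB k c n groups total with
          | Sum.inl r => r
          | Sum.inr (g, t) => pvGreedyA k rest g t) := by
  intro n
  induction n with
  | zero => intro groups total; simp [pvInnerB]
  | succ n ih =>
      intro groups total
      simp only [List.replicate_succ, List.cons_append, pvGreedyA, pvInnerB]
      split_ifs with h
      · rfl
      · exact ih (groups + 1) (total + c)

-- outer loop = greedy run over the flattened sequence
theorem pvOuterB_spec (k : Int) (freq : PySem.Dict Int Int) :
    ∀ (cs : List Int) (groups total : Int),
      pvOuterB k freq cs groups total =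
        pvGreedyA k (cs.flatMap (fun c => List.replicate (freq.getD c 0).toNat c)) groups total := by
  intro cs
  induction cs with
  | nil => intro groups total; simp [pvOuterB, pvGreedyA]
  | cons c rest ih =>
      intro groups total
      simp only [pvOuterB, List.flatMap_cons]
      rw [pvInnerB_spec]
      cases pvInnerB k c (freq.getD c 0).toNat groups total with
      | inl r => rfl
      | inr gt => exact ih gt.1 gt.2

theorem pvOfList_ne_nil {xs : List Int} (h : xs ≠ []) : PySem.Set.ofList xs ≠ [] := by
  obtain ⟨x, t, rfl⟩ := List.exists_cons_of_ne_nil h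
  intro hc
  have hx : x ∈ PySem.Set.ofList (x :: t) := (PySem.Set.mem_ofList _ _).2 (by simp)
  rw [hc] at hx
  simp at hx

theorem solution_eq_alt (k : Int) (tangerine : List Int) :
    solution k tangerine = solution_alt k tangerine := by
  unfold solution solution_alt
  by_cases hnil : tangerine = []
  · subst hnil
    simp [PySem.Dict.counter, PySem.Dict.size, PySem.Dict.empty, PySem.Dict.values,
      PySem.List.sorted, pvGreedyA]
  · set tcount := PySem.Dict.counter tangerine with htc
    set vs := tcount.values with hvs
    have hvals : vs = (PySem.Set.ofList tangerine).map (fun v => (tangerine.count v : Int)) := by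
      rw [hvs, show tcount.values = tcount.items.map (·.2) from rfl, htc,
        PySem.Dict.items_counter]
      simp
    have hsz : ¬ tcount.size = 0 := by
      have : tcount.size = tcount.items.length := rfl
      rw [this, htc, PySem.Dict.items_counter]
      simpa using pvOfList_ne_nil hnil
    simp only [hsz, if_false]
    have hpos : ∀ v ∈ vs, 1 ≤ v := by
      rw [hvals]
      intro v hv
      rcases List.mem_map.1 hv with ⟨x, hx, rfl⟩
      have : x ∈ tangerine := (PySem.Set.mem_ofList _ _).1 hx
      have := List.count_pos_iff.2 this
      omega
    set freq := PySem.Dict.counter vs with hfreq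
    have hkeys : freq.keys = PySem.Set.ofList vs := PySem.Dict.keys_counter vs
    have hvne : vs ≠ [] := by
      rw [hvals]
      intro h
      exact pvOfList_ne_nil hnil (List.map_eq_nil_iff.1 h)
    have hkne : freq.keys ≠ [] := by
      rw [hkeys]; exact pvOfList_ne_nil hvne
    obtain ⟨mx, hmx⟩ : ∃ mx, PySem.List.max? freq.keys (fun x => x) = some mx := by
      cases h : PySem.List.max? freq.keys (fun x => x) with
      | none => exact absurd ((PySem.List.max?_eq_none_iff _ _).1 h) hkne
      | some m => exact ⟨m, rfl⟩
    rw [hmx]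
    simp only [Option.getD_some]
    have hmx_mem : mx ∈ vs := by
      have := PySem.List.max?_mem hmx
      rw [hkeys] at this
      exact (PySem.Set.mem_ofList _ _).1 this
    have hub : ∀ v ∈ vs, v ≤ mx := by
      intro v hv
      exact PySem.List.max?_isMax hmx v (by rw [hkeys]; exact (PySem.Set.mem_ofList _ _).2 hv)
    have hmx1 : 1 ≤ mx := hpos mx hmx_mem
    have hmxnat : ((mx.toNat : Nat) : Int) = mx := Int.toNat_of_nonneg (by omega)
    have hbound : ∀ v ∈ vs, 1 ≤ v ∧ v ≤ ((mx.toNat : Nat) : Int) := by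
      intro v hv; rw [hmxnat]; exact ⟨hpos v hv, hub v hv⟩
    rw [pvOuterB_spec]
    have hflat : (PySem.List.pyRange ((mx.toNat : Nat) : Int) 0 (-1)).flatMap
        (fun c => List.replicate (freq.getD c 0).toNat c) = pvFlat vs mx.toNat := by
      unfold pvFlat
      congr 1
      funext c
      rw [hfreq, PySem.Dict.getD_counter]
      simp
    rw [show PySem.List.pyRange mx 0 (-1) = PySem.List.pyRange ((mx.toNat : Nat) : Int) 0 (-1) by rw [hmxnat]]
    rw [hflat, ← pvFlat_eq_sorted vs mx.toNat hbound]

-- ===== VERDICT (by name: the statement is the Claim_ definition above) =====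
theorem solution_spec : Claim_equal_solution := by
  intro k tangerine _
  unfold Spec_solution
  exact solution_eq_alt k tangerine
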